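-- pv_equiv track=rewrite | github.com/syha6821/advent-of-code | 2020/23/2.py | dest
-- ===== SOURCE A (Python) =====
-- MIL = 1000000
--
-- def dest(current,picks,cups):
--     if current - 1 < 1:
--         return dest(MIL + 1,picks,cups)
--     else:
--         if current - 1 in picks:
--             return dest(current - 1,picks,cups)
--         else:
--             return current - 1
-- ===== SOURCE B (Python) =====
-- MIL = 1000000
--
-- def dest(current, picks, cups):
--     # two-phase scan with a hash set instead of recursion with list membership
--     s = set(picks)
--     t = current - 1
--     while t >= 1:
--         if t not in s:
--             return t
--         t -= 1
--     t = MIL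
--     while t in s:
--         t -= 1
--     return t
-- ===== Notes on version B (the rewrite author's own statement) =====
-- stated objective: alternative
-- what changed: Replaces the recursive descend-and-wrap with two explicit bounded scans (one downward from current-1, one downward from MIL after the wrap) over a hash set built once from picks, instead of recursion with a linear list-membership test at every step.
import Mathlib
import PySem

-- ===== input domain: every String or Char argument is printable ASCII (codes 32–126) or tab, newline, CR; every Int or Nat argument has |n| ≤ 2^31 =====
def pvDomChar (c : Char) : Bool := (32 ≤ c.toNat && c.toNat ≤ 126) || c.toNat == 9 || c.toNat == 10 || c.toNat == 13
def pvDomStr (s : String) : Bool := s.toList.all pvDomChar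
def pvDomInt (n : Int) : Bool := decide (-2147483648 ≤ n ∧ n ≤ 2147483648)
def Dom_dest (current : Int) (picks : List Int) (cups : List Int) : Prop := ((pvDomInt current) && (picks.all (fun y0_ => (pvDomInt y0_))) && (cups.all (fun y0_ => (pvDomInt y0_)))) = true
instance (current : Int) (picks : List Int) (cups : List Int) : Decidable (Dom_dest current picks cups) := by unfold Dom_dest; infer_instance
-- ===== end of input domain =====

-- B replaces A's recursive descend-and-wrap (linear list membership each step) by two explicit
-- bounded downward scans over a set built once from picks; equal return values on Pre_ (alternative).


-- ===== PORT A =====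
-- A's recursion may not terminate (when picks covers every candidate); the fuel argument is a
-- totality guard only: on every input admitted by Pre_dest the fuel provably suffices.
def destAuxA : Nat → Int → List Int → Option Int
  | 0, _, _ => none
  | f + 1, current, picks =>
    if current - 1 < 1 then destAuxA f (1000000 + 1) picks
    else if current - 1 ∈ picks then destAuxA f (current - 1) picks
    else some (current - 1)

def dest (current : Int) (picks : List Int) (cups : List Int) : Int :=
  (destAuxA ((current - 1).toNat + 1000002) current picks).getD 0

-- ===== PORT B =====
-- first loop of Source B: scan downward from current-1 while t >= 1; some t = "return t", none = fell through
def loop1 (t : Int) (s : PySem.Set Int) : Option Int :=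
  if h : 1 ≤ t then
    if t ∉ s then some t else loop1 (t - 1) s
  else none
termination_by t.toNat
decreasing_by omega

-- second loop of Source B: scan downward from MIL while t in s; fuel is a totality guard only
-- (on Pre_dest inputs reached with loop1 = none, the gap lies in [1, MIL], so fuel suffices)
def loop2 : Nat → Int → PySem.Set Int → Int
  | 0, t, _ => t
  | f + 1, t, s => if t ∈ s then loop2 f (t - 1) s else t

def dest_alt (current : Int) (picks : List Int) (cups : List Int) : Int :=
  let s := PySem.Set.ofList picks
  match loop1 (current - 1) s with
  | some t => t
  | none => loop2 1000000 1000000 s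

-- ===== PRECONDITION & SPEC =====
-- Pre_dest excludes exactly the inputs on which picks contains every candidate value in
-- [1, max MIL (current-1)]: there A's recursion never returns (Python RecursionError).
def Pre_dest (current : Int) (picks : List Int) (cups : List Int) : Prop :=
  (((picks.dedup.filter (fun x => decide (1 ≤ x) && decide (x ≤ max 1000000 (current - 1)))).length : Int)
    < max 1000000 (current - 1))
instance (current : Int) (picks : List Int) (cups : List Int) : Decidable (Pre_dest current picks cups) := by
  unfold Pre_dest; infer_instance

def pvWitness_dest : Int × List Int × List Int := (10, [9, 8], [])

def Spec_dest (current : Int) (picks : List Int) (cups : List Int) (out : Int) : Prop := out = dest_alt current picks cups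
instance (current : Int) (picks : List Int) (cups : List Int) (out : Int) : Decidable (Spec_dest current picks cups out) := by unfold Spec_dest; infer_instance

-- ===== CLAIM (what is proved, stated in full; the proofs are below) =====
def Claim_equal_dest : Prop := ∀ (current : Int) (picks : List Int) (cups : List Int), Dom_dest current picks cups → Pre_dest current picks cups → Spec_dest current picks cups (dest current picks cups)

-- ===== LEMMAS AND PROOFS =====

-- pigeonhole: if the count of distinct picks in [1,U] is below U, some value in [1,U] is missing
theorem pv_gap (U : Int) (p : List Int)
    (h : ((p.dedup.filter (fun x => decide (1 ≤ x) && decide (x ≤ U))).length : Int) < U) :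
    ∃ m : Int, 1 ≤ m ∧ m ≤ U ∧ m ∉ p := by
  by_contra hc
  push_neg at hc
  have hU : 0 < U := lt_of_le_of_lt (Int.natCast_nonneg _) h
  have hUt : ((U.toNat : Int)) = U := Int.toNat_of_nonneg (le_of_lt hU)
  set L := p.dedup.filter (fun x => decide (1 ≤ x) && decide (x ≤ U)) with hL
  set L0 : List Int := (List.range U.toNat).map (fun i : Nat => ((i : Int) + 1)) with hL0
  have hsub : L0 ⊆ L := by
    intro x hx
    rw [hL0] at hx
    simp only [List.mem_map, List.mem_range] at hx
    obtain ⟨i, hi, rfl⟩ := hx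
    have h1 : (1 : Int) ≤ (i : Int) + 1 := by omega
    have h2 : (i : Int) + 1 ≤ U := by omega
    have hp : ((i : Int) + 1) ∈ p := hc _ h1 h2
    rw [hL]
    refine List.mem_filter.2 ⟨List.mem_dedup.2 hp, ?_⟩
    simp [h1, h2]
  have hnd : L0.Nodup := by
    rw [hL0]
    refine List.Nodup.map ?_ List.nodup_range
    intro a b hab
    simp only at hab
    omega
  have hle := (List.subperm_of_subset hnd hsub).length_le
  rw [hL0] at hle
  simp only [List.length_map, List.length_range] at hle
  omega

theorem pv_mem_ofList (p : List Int) (x : Int) : x ∈ PySem.Set.ofList p ↔ x ∈ p :=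
  PySem.Set.mem_ofList p x

-- one descent step of A's recursion, candidate still picked
theorem pv_stepA (p : List Int) (t : Int) (h1 : 1 ≤ t) (hm : t ∈ p) (k : Nat) :
    destAuxA (k + 1) (t + 1) p = destAuxA k t p := by
  rw [destAuxA]
  rw [if_neg (by omega : ¬ (t + 1 - 1 < 1))]
  rw [if_pos (by simpa using hm : t + 1 - 1 ∈ p)]
  norm_num

-- one descent step of A's recursion, candidate free: return it
theorem pv_stepA_ret (p : List Int) (t : Int) (h1 : 1 ≤ t) (hm : t ∉ p) (k : Nat) :
    destAuxA (k + 1) (t + 1) p = some t := by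
  rw [destAuxA]
  rw [if_neg (by omega : ¬ (t + 1 - 1 < 1))]
  rw [if_neg (by simpa using hm : ¬ (t + 1 - 1 ∈ p))]
  norm_num

-- loop1 found a value: A's recursion returns the same value (with enough fuel)
theorem pv_lemA1 (p : List Int) : ∀ (n : Nat) (t : Int), t.toNat ≤ n →
    ∀ r, loop1 t (PySem.Set.ofList p) = some r →
    ∀ f, destAuxA (t.toNat + 1 + f) (t + 1) p = some r := by
  intro n
  induction n with
  | zero =>
    intro t ht r hr f
    rw [loop1] at hr
    have h1 : ¬ (1 ≤ t) := by omega
    simp [h1] at hr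
  | succ n ih =>
    intro t ht r hr f
    by_cases h1 : 1 ≤ t
    · rw [loop1] at hr
      simp only [h1, dif_pos] at hr
      by_cases hm : t ∈ PySem.Set.ofList p
      · have hmp : t ∈ p := (pv_mem_ofList p t).1 hm
        have hr' : loop1 (t - 1) (PySem.Set.ofList p) = some r := by
          simpa [hm] using hr
        have ihh := ih (t - 1) (by omega) r hr' f
        rw [show t.toNat + 1 + f = ((t - 1).toNat + 1 + f) + 1 by omega]
        rw [pv_stepA p t h1 hmp]
        simpa using ihh
      · have hmp : t ∉ p := fun hc => hm ((pv_mem_ofList p t).2 hc)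
        have hr' : r = t := by
          simp [hm] at hr
          omega
        rw [hr']
        rw [show t.toNat + 1 + f = (t.toNat + f) + 1 by omega]
        exact pv_stepA_ret p t h1 hmp _
    · rw [loop1] at hr
      simp [h1] at hr

-- A ignores the exact (non-positive) value at a wrap
theorem pv_wrapbase (p : List Int) (t : Int) (ht : t ≤ 0) :
    ∀ f, destAuxA f (t + 1) p = destAuxA f 1 p := by
  intro f
  rcases eq_or_lt_of_le ht with h | h
  · subst h
    norm_num
  · cases f with
    | zero => rfl
    | succ g =>
      rw [destAuxA, destAuxA]
      rw [if_pos (by omega : t + 1 - 1 < 1), if_pos (by omega : (1 : Int) - 1 < 1)]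

-- loop1 fell through: A's recursion descends to the wrap, consuming at most t.toNat fuel
theorem pv_lemA2 (p : List Int) : ∀ (n : Nat) (t : Int), t.toNat ≤ n →
    loop1 t (PySem.Set.ofList p) = none →
    ∀ f, destAuxA (t.toNat + f) (t + 1) p = destAuxA f 1 p := by
  intro n
  induction n with
  | zero =>
    intro t ht _ f
    have := pv_wrapbase p t (by omega) f
    simpa [show t.toNat = 0 by omega] using this
  | succ n ih =>
    intro t ht hr f
    by_cases h1 : 1 ≤ t
    · rw [loop1] at hr
      simp only [h1, dif_pos] at hr
      by_cases hm : t ∈ PySem.Set.ofList p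
      · have hmp : t ∈ p := (pv_mem_ofList p t).1 hm
        have hr' : loop1 (t - 1) (PySem.Set.ofList p) = none := by
          simpa [hm] using hr
        rw [show t.toNat + f = ((t - 1).toNat + f) + 1 by omega]
        rw [pv_stepA p t h1 hmp]
        have := ih (t - 1) (by omega) hr' f
        simpa using this
      · simp [hm] at hr
    · have := pv_wrapbase p t (by omega) f
      simpa [show t.toNat = 0 by omega] using this

-- loop1 fell through: every candidate in [1, t] is in picks
theorem pv_lem_none (p : List Int) : ∀ (n : Nat) (t : Int), t.toNat ≤ n →
    loop1 t (PySem.Set.ofList p) = none →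
    ∀ x : Int, 1 ≤ x → x ≤ t → x ∈ p := by
  intro n
  induction n with
  | zero =>
    intro t ht _ x hx1 hx2
    omega
  | succ n ih =>
    intro t ht hr x hx1 hx2
    have h1 : 1 ≤ t := by omega
    rw [loop1] at hr
    simp only [h1, dif_pos] at hr
    by_cases hm : t ∈ PySem.Set.ofList p
    · have hr' : loop1 (t - 1) (PySem.Set.ofList p) = none := by
        simpa [hm] using hr
      rcases eq_or_lt_of_le hx2 with h | h
      · subst h
        exact (pv_mem_ofList p x).1 hm
      · exact ih (t - 1) (by omega) hr' x hx1 (by omega)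
    · simp [hm] at hr

-- with a gap in [1, t], A's descent from t+1 produces exactly loop2's scan value
theorem pv_lem2 (p : List Int) : ∀ (n : Nat) (t : Int), 0 ≤ t → t ≤ (n : Int) →
    (∃ m : Int, 1 ≤ m ∧ m ≤ t ∧ m ∉ p) →
    destAuxA (n + 1) (t + 1) p = some (loop2 n t (PySem.Set.ofList p)) := by
  intro n
  induction n with
  | zero =>
    intro t h0 hn hgap
    obtain ⟨m, hm1, hm2, _⟩ := hgap
    omega
  | succ n ih =>
    intro t h0 hn hgap
    obtain ⟨m, hm1, hm2, hm3⟩ := hgap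
    have h1 : 1 ≤ t := by omega
    by_cases hmem : t ∈ p
    · have hmt : m ≤ t - 1 := by
        rcases eq_or_lt_of_le hm2 with h | h
        · exact absurd (h ▸ hmem) hm3
        · omega
      rw [pv_stepA p t h1 hmem]
      have hset : t ∈ PySem.Set.ofList p := (pv_mem_ofList p t).2 hmem
      rw [show loop2 (n + 1) t (PySem.Set.ofList p)
            = loop2 n (t - 1) (PySem.Set.ofList p) by rw [loop2, if_pos hset]]
      have := ih (t - 1) (by omega) (by omega) ⟨m, hm1, hmt, hm3⟩
      simpa using this
    · rw [pv_stepA_ret p t h1 hmem]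
      have hset : t ∉ PySem.Set.ofList p := fun hc => hmem ((pv_mem_ofList p t).1 hc)
      rw [show loop2 (n + 1) t (PySem.Set.ofList p) = t by rw [loop2, if_neg hset]]

-- ===== VERDICT (by name: the statement is the Claim_ definition above) =====
theorem dest_spec : Claim_equal_dest := by
  intro c p cups _ hpre
  unfold Spec_dest dest dest_alt
  unfold Pre_dest at hpre
  obtain ⟨m, hm1, hm2, hm3⟩ := pv_gap (max 1000000 (c - 1)) p hpre
  cases hl : loop1 (c - 1) (PySem.Set.ofList p) with
  | some r =>
    have h := pv_lemA1 p (c - 1).toNat (c - 1) le_rfl r hl 1000001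
    rw [show (c - 1) + 1 = c by ring] at h
    rw [show (c - 1).toNat + 1000002 = (c - 1).toNat + 1 + 1000001 by omega, h]
    simp [hl]
  | none =>
    have hcov := pv_lem_none p (c - 1).toNat (c - 1) le_rfl hl
    have hmMIL : m ≤ 1000000 := by
      by_cases hc1 : m ≤ c - 1
      · exact absurd (hcov m hm1 hc1) hm3
      · rcases le_max_iff.1 hm2 with h | h
        · exact h
        · omega
    have h2 := pv_lemA2 p (c - 1).toNat (c - 1) le_rfl hl 1000002
    rw [show (c - 1) + 1 = c by ring] at h2
    have h3 : destAuxA 1000002 (1 : Int) p = destAuxA 1000001 ((1000000 : Int) + 1) p := by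
      rw [show (1000002 : Nat) = 1000001 + 1 by norm_num, destAuxA]
      rw [if_pos (by omega : (1 : Int) - 1 < 1)]
    have h4 := pv_lem2 p 1000000 1000000 (by omega) (by norm_num) ⟨m, hm1, hmMIL, hm3⟩
    simp only [hl]
    rw [h2, h3]
    norm_num at h4 ⊢
    rw [h4]
    rfl
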